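-- pv_equiv track=rewrite | github.com/benbendaisy/CommunicationCodes | python_module/examples/403_Frog_Jump.py | canCross1
-- ===== SOURCE A (Python) =====
-- from functools import lru_cache
-- from typing import List
--
-- def canCross1(stones: List[int]) -> bool:
--     @lru_cache(None)
--     def can_cross(idx, jumpsize):
--         for i in range(idx + 1, len(stones)):
--             gap = stones[i] - stones[idx]
--             if jumpsize - 1 <= gap <= jumpsize + 1:
--                 if can_cross(i, gap):
--                     return True
--         return idx == len(stones) - 1
--     return can_cross(0, 0)
-- ===== SOURCE B (Python) =====
-- def canCross1(stones):
--     n = len(stones)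
--     if n == 0:
--         return False
--     reach = [set() for _ in range(n)]
--     reach[0].add(0)
--     for i in range(n):
--         for k in reach[i]:
--             for j in range(i + 1, n):
--                 gap = stones[j] - stones[i]
--                 if k - 1 <= gap <= k + 1:
--                     reach[j].add(gap)
--     return len(reach[n - 1]) > 0
-- ===== Notes on version B (the rewrite author's own statement) =====
-- stated objective: alternative
-- what changed: Replaced the top-down memoized recursion by an iterative bottom-up DP that sweeps the indices once, maintaining for each stone the set of jump sizes that can land there, and answers by non-emptiness of the last stone's set; B trades A's early-exit short-circuiting for a single predictable recursion-free sweep.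
import Mathlib
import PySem

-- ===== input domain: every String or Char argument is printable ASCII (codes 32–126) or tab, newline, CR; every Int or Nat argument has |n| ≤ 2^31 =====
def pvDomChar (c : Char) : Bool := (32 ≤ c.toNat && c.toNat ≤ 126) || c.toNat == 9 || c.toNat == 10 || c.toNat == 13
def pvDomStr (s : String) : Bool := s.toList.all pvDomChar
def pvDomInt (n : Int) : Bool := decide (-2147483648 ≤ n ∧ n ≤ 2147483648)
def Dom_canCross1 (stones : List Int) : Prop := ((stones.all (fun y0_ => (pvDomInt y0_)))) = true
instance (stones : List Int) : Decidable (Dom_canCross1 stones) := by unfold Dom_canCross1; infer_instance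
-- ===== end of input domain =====

-- B replaces A's top-down memoized recursion by an iterative bottom-up DP over per-stone sets of
-- arriving jump sizes (objective: alternative; same worst-case cost, no recursion).

-- ===== PORT A =====
-- A's memoized recursion `can_cross(idx, jumpsize)`; lru_cache only caches, it does not change
-- values, so the port is the plain recursion, driven by fuel (n - idx strictly shrinks; when fuel
-- hits 0 the loop range is empty and the returned `idx == len(stones) - 1` matches Python's).
def canCross1Aux (stones : List Int) : Nat → Int → Int → Bool
  | 0, idx, _ => idx == (stones.length : Int) - 1
  | fuel+1, idx, jumpsize =>
    ((PySem.List.pyRange (idx + 1) (stones.length : Int) 1).any (fun i =>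
       let gap := PySem.List.pyGetD stones i 0 - PySem.List.pyGetD stones idx 0
       decide (jumpsize - 1 ≤ gap ∧ gap ≤ jumpsize + 1) && canCross1Aux stones fuel i gap))
    || (idx == (stones.length : Int) - 1)

def canCross1 (stones : List Int) : Bool :=
  canCross1Aux stones stones.length 0 0

-- ===== PORT B =====
-- Source B: reach[j] = set of gaps with which stone j can be reached; sweep i = 0..n-1 once.
def canCross1_alt (stones : List Int) : Bool :=
  let n := stones.length
  if n = 0 then false
  else
    let reach0 : List (PySem.Set Int) := (List.range n).map (fun _ => PySem.Set.empty)
    let reach1 := reach0.set 0 (PySem.Set.add (reach0.getD 0 PySem.Set.empty) 0)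
    let reach := (List.range n).foldl (fun reach i =>
        (reach.getD i PySem.Set.empty).foldl (fun reach k =>
          (PySem.List.pyRange ((i : Int) + 1) (n : Int) 1).foldl (fun reach j =>
            let gap := PySem.List.pyGetD stones j 0 - PySem.List.pyGetD stones (i : Int) 0
            if k - 1 ≤ gap ∧ gap ≤ k + 1 then
              PySem.List.pySetD reach j (PySem.Set.add (PySem.List.pyGetD reach j PySem.Set.empty) gap)
            else reach) reach) reach) reach1
    decide (0 < PySem.Set.len (reach.getD (n - 1) PySem.Set.empty))

-- ===== PRECONDITION & SPEC =====
def Spec_canCross1 (stones : List Int) (out : Bool) : Prop := out = canCross1_alt stones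
instance (stones : List Int) (out : Bool) : Decidable (Spec_canCross1 stones out) := by unfold Spec_canCross1; infer_instance

-- ===== CLAIM (what is proved, stated in full; the proofs are below) =====
def Claim_equal_canCross1 : Prop := ∀ (stones : List Int), Dom_canCross1 stones → Spec_canCross1 stones (canCross1 stones)

-- ===== LEMMAS AND PROOFS =====

-- stones[j] for an in-range Nat index (all indexing both programs actually perform is in range)
def gd (stones : List Int) (j : Nat) : Int := stones.getD j 0

-- reachability of state (index, jump size) from the start state (0, 0) by legal jumps
inductive Rch (stones : List Int) : Nat → Int → Prop where
  | refl : Rch stones 0 0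
  | step {a : Nat} {k : Int} (b : Nat) (h : Rch stones a k) (hab : a < b) (hb : b < stones.length)
      (h1 : k - 1 ≤ gd stones b - gd stones a) (h2 : gd stones b - gd stones a ≤ k + 1) :
      Rch stones b (gd stones b - gd stones a)

-- from state (idx, js) the last index is reachable (A's can_cross truth condition)
inductive RF (stones : List Int) : Nat → Int → Prop where
  | base (idx : Nat) (js : Int) (h : idx = stones.length - 1) : RF stones idx js
  | step (idx b : Nat) (js : Int) (hab : idx < b) (hb : b < stones.length)
      (h1 : js - 1 ≤ gd stones b - gd stones idx) (h2 : gd stones b - gd stones idx ≤ js + 1)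
      (h : RF stones b (gd stones b - gd stones idx)) : RF stones idx js

-- ---- A side ----

-- ---- B side ----

-- gaps in reach[j] after the outer loop has processed indices < t
def RL (stones : List Int) (t j : Nat) (g : Int) : Prop :=
  (j = 0 ∧ g = 0) ∨
  ∃ a k, a < t ∧ Rch stones a k ∧ a < j ∧ g = gd stones j - gd stones a ∧ k - 1 ≤ g ∧ g ≤ k + 1

-- the body of Source B's innermost loop, in Nat-indexed form
def addAt (stones : List Int) (t : Nat) (k : Int) (reach : List (PySem.Set Int)) (j : Nat) :
    List (PySem.Set Int) :=
  if k - 1 ≤ gd stones j - gd stones t ∧ gd stones j - gd stones t ≤ k + 1 then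
    reach.set j (PySem.Set.add (reach.getD j []) (gd stones j - gd stones t))
  else reach

def rangeL (n t : Nat) : List Nat := (List.range (n - (t + 1))).map (fun k2 => t + 1 + k2)

def midN (stones : List Int) (t : Nat) (reach : List (PySem.Set Int)) : List (PySem.Set Int) :=
  (reach.getD t []).foldl (fun r k => (rangeL stones.length t).foldl (addAt stones t k) r) reach

def reachInit (n : Nat) : List (PySem.Set Int) :=
  ((List.range n).map (fun _ => PySem.Set.empty)).set 0
    (PySem.Set.add (((List.range n).map (fun _ => (PySem.Set.empty : PySem.Set Int))).getD 0
      PySem.Set.empty) 0)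

-- ===== VERDICT (by name: the statement is the Claim_ definition above) =====

theorem getD_set_mem {α : Type} (xs : List α) (i j : Nat) (v d : α) :
    (xs.set i v).getD j d = if j = i ∧ i < xs.length then v else xs.getD j d := by
  simp [List.getD_eq_getElem?_getD, List.getElem?_set]
  split_ifs <;> simp_all

theorem mem_rangeL (n t j : Nat) : j ∈ rangeL n t ↔ t < j ∧ j < n := by
  simp only [rangeL, List.mem_map, List.mem_range]
  constructor
  · rintro ⟨k2, hk, rfl⟩; omega
  · rintro ⟨h1, h2⟩; exact ⟨j - (t+1), by omega, by omega⟩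

theorem RL_iff_Rch (stones : List Int) (t j : Nat) (g : Int) (hjt : j ≤ t)
    (hj : j < stones.length) : RL stones t j g ↔ Rch stones j g := by
  constructor
  · rintro (⟨rfl, rfl⟩ | ⟨a, k, hat, hR, haj, rfl, h1, h2⟩)
    · exact Rch.refl
    · exact Rch.step j hR haj hj h1 h2
  · intro h
    cases h with
    | refl => exact Or.inl ⟨rfl, rfl⟩
    | step b hR hab hb h1 h2 => exact Or.inr ⟨_, _, by omega, hR, hab, rfl, h1, h2⟩

theorem RF_of_Rch (stones : List Int) {a : Nat} {k : Int} (h : Rch stones a k) :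
    RF stones a k → RF stones 0 0 := by
  induction h with
  | refl => exact id
  | step b hR hab hb h1 h2 ih => exact fun hf => ih (RF.step _ b _ hab hb h1 h2 hf)

theorem Rch_end_of_RF (stones : List Int) {a : Nat} {k : Int} (h : RF stones a k) :
    Rch stones a k → ∃ g, Rch stones (stones.length - 1) g := by
  induction h with
  | base idx js hidx => exact fun hr => ⟨_, hidx ▸ hr⟩
  | step idx b js hab hb h1 h2 hf ih => exact fun hr => ih (Rch.step b hr hab hb h1 h2)

theorem length_addAt (stones : List Int) (t : Nat) (k : Int) (reach : List (PySem.Set Int))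
    (j : Nat) : (addAt stones t k reach j).length = reach.length := by
  unfold addAt; split_ifs <;> simp

theorem mem_addAt (stones : List Int) (t : Nat) (k : Int) (reach : List (PySem.Set Int))
    (j j' : Nat) (hj : j < reach.length) (g : Int) :
    g ∈ (addAt stones t k reach j).getD j' [] ↔
      g ∈ reach.getD j' [] ∨
        (j' = j ∧ g = gd stones j' - gd stones t ∧ k - 1 ≤ g ∧ g ≤ k + 1) := by
  unfold addAt
  split_ifs with hcond
  · rw [getD_set_mem]
    split_ifs with h2
    · obtain ⟨rfl, -⟩ := h2
      simp only [PySem.Set.mem_add]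
      constructor
      · rintro (h | rfl)
        · exact Or.inl h
        · exact Or.inr ⟨trivial, rfl, hcond.1, hcond.2⟩
      · rintro (h | ⟨-, rfl, -, -⟩)
        · exact Or.inl h
        · exact Or.inr rfl
    · have : j' ≠ j := fun h => h2 ⟨h, hj⟩
      tauto
  · constructor
    · tauto
    · rintro (h | ⟨rfl, rfl, h1, h2⟩)
      · exact h
      · exact absurd ⟨h1, h2⟩ hcond

theorem foldl_addAt_mem (stones : List Int) (t : Nat) (k : Int) :
    ∀ (L : List Nat) (reach : List (PySem.Set Int)), (∀ j ∈ L, j < reach.length) →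
    (L.foldl (addAt stones t k) reach).length = reach.length ∧
    ∀ j' g, g ∈ (L.foldl (addAt stones t k) reach).getD j' [] ↔
      g ∈ reach.getD j' [] ∨
        (j' ∈ L ∧ g = gd stones j' - gd stones t ∧ k - 1 ≤ g ∧ g ≤ k + 1) := by
  intro L
  induction L with
  | nil => intro reach _; simp
  | cons j L ih =>
    intro reach hL
    have hj : j < reach.length := hL j (List.mem_cons_self ..)
    have hL' : ∀ j' ∈ L, j' < (addAt stones t k reach j).length := by
      rw [length_addAt]; exact fun j' h => hL j' (List.mem_cons_of_mem _ h)
    obtain ⟨ihlen, ihmem⟩ := ih (addAt stones t k reach j) hL'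
    refine ⟨by rw [List.foldl_cons, ihlen, length_addAt], ?_⟩
    intro j' g
    rw [List.foldl_cons, ihmem j' g, mem_addAt stones t k reach j j' hj g]
    simp only [List.mem_cons]
    constructor
    · rintro ((h | h) | h) <;> tauto
    · rintro (h | ⟨(h | h), hrest⟩) <;> tauto

theorem foldl_mid_mem (stones : List Int) (t : Nat) :
    ∀ (K : List Int) (reach : List (PySem.Set Int)),
    (∀ j ∈ rangeL stones.length t, j < reach.length) →
    (K.foldl (fun r k => (rangeL stones.length t).foldl (addAt stones t k) r) reach).length
      = reach.length ∧
    ∀ j' g, g ∈ (K.foldl (fun r k => (rangeL stones.length t).foldl (addAt stones t k) r)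
        reach).getD j' [] ↔
      g ∈ reach.getD j' [] ∨
        (j' ∈ rangeL stones.length t ∧ g = gd stones j' - gd stones t ∧
          ∃ k' ∈ K, k' - 1 ≤ g ∧ g ≤ k' + 1) := by
  intro K
  induction K with
  | nil => intro reach _; simp
  | cons k K ih =>
    intro reach hL
    obtain ⟨len1, mem1⟩ := foldl_addAt_mem stones t k (rangeL stones.length t) reach hL
    have hL' : ∀ j ∈ rangeL stones.length t,
        j < ((rangeL stones.length t).foldl (addAt stones t k) reach).length := by
      rw [len1]; exact hL
    obtain ⟨ihlen, ihmem⟩ := ih ((rangeL stones.length t).foldl (addAt stones t k) reach) hL'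
    refine ⟨by rw [List.foldl_cons, ihlen, len1], ?_⟩
    intro j' g
    rw [List.foldl_cons, ihmem j' g, mem1 j' g]
    simp only [List.mem_cons]
    constructor
    · rintro ((h | ⟨h1, h2, h3⟩) | ⟨h1, h2, k', hk', h3⟩)
      · exact Or.inl h
      · exact Or.inr ⟨h1, h2, k, Or.inl rfl, h3⟩
      · exact Or.inr ⟨h1, h2, k', Or.inr hk', h3⟩
    · rintro (h | ⟨h1, h2, k', (rfl | hk'), h3⟩)
      · exact Or.inl (Or.inl h)
      · exact Or.inl (Or.inr ⟨h1, h2, h3⟩)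
      · exact Or.inr ⟨h1, h2, k', hk', h3⟩


theorem body_eq (stones : List Int) (reach : List (PySem.Set Int)) (i : Nat) :
    ((reach.getD i PySem.Set.empty).foldl (fun reach k =>
        (PySem.List.pyRange ((i : Int) + 1) (stones.length : Int) 1).foldl (fun reach j =>
          let gap := PySem.List.pyGetD stones j 0 - PySem.List.pyGetD stones (i : Int) 0
          if k - 1 ≤ gap ∧ gap ≤ k + 1 then
            PySem.List.pySetD reach j (PySem.Set.add (PySem.List.pyGetD reach j PySem.Set.empty) gap)
          else reach) reach) reach)
    = midN stones i reach := by
  unfold midN rangeL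
  have hempty : (PySem.Set.empty : PySem.Set Int) = [] := rfl
  rw [hempty]
  congr 1
  funext r k
  rw [PySem.List.pyRange_one, List.foldl_map, List.foldl_map]
  have hcnt : ((stones.length : Int) - ((i : Int) + 1)).toNat = stones.length - (i + 1) := by omega
  rw [hcnt]
  congr 1
  funext r' k2
  have hcast : ((i : Int) + 1 + (k2 : Int)) = ((i + 1 + k2 : Nat) : Int) := by push_cast; ring
  simp only [hcast, PySem.List.pyGetD_natCast, PySem.List.pySetD_natCast]
  unfold addAt gd
  have : i + 1 + k2 = i + (1 + k2) := by omega
  rw [this]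

theorem reachInit_getD (n j : Nat) (hn : 0 < n) :
    (reachInit n).getD j [] = if j = 0 then [(0 : Int)] else [] := by
  unfold reachInit
  have hlen : ((List.range n).map (fun _ => (PySem.Set.empty : PySem.Set Int))).length = n := by
    simp
  have hget : ∀ (m : Nat) (d : PySem.Set Int),
      ((List.range n).map (fun _ => (PySem.Set.empty : PySem.Set Int))).getD m d
        = if m < n then PySem.Set.empty else d := by
    intro m d
    rw [List.getD_eq_getElem?_getD]
    split_ifs with hm
    · rw [List.getElem?_eq_getElem (by simpa using hm)]
      simp
    · rw [List.getElem?_eq_none (by simpa using hm)]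
      rfl
  rw [getD_set_mem, hlen]
  by_cases h : j = 0
  · subst h
    rw [if_pos ⟨rfl, hn⟩, if_pos rfl, hget 0 PySem.Set.empty, if_pos hn]
    rfl
  · rw [if_neg (by tauto), if_neg h, hget j []]
    split_ifs <;> rfl

theorem inv (stones : List Int) (hne : stones ≠ []) : ∀ t, t ≤ stones.length →
    ((List.range t).foldl (fun r i => midN stones i r) (reachInit stones.length)).length
      = stones.length ∧
    ∀ j g, j < stones.length →
      (g ∈ ((List.range t).foldl (fun r i => midN stones i r)
          (reachInit stones.length)).getD j [] ↔ RL stones t j g) := by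
  have hn : 0 < stones.length := List.length_pos_iff.mpr hne
  intro t
  induction t with
  | zero =>
    intro _
    constructor
    · simp [reachInit]
    · intro j g hj
      rw [List.range_zero, List.foldl_nil, reachInit_getD _ _ hn]
      unfold RL
      split_ifs with h
      · subst h; simp
      · simp [h]
  | succ t ih =>
    intro ht
    obtain ⟨ihlen, ihmem⟩ := ih (by omega)
    set R := (List.range t).foldl (fun r i => midN stones i r) (reachInit stones.length) with hR
    have htn : t < stones.length := by omega
    have hrange : ∀ j ∈ rangeL stones.length t, j < R.length := by
      intro j hj; rw [ihlen]; exact ((mem_rangeL _ _ _).mp hj).2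
    obtain ⟨len2, mem2⟩ := foldl_mid_mem stones t (R.getD t []) R hrange
    rw [List.range_succ, List.foldl_append, List.foldl_cons, List.foldl_nil]
    have hmid : midN stones t R = (R.getD t []).foldl
        (fun r k => (rangeL stones.length t).foldl (addAt stones t k) r) R := rfl
    rw [hmid]
    refine ⟨by rw [len2, ihlen], ?_⟩
    intro j g hj
    rw [mem2 j g]
    have hK : ∀ k, k ∈ R.getD t [] ↔ Rch stones t k := by
      intro k
      rw [ihmem t k htn, RL_iff_Rch stones t t k le_rfl htn]
    rw [ihmem j g hj, mem_rangeL]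
    unfold RL
    constructor
    · rintro ((⟨rfl, rfl⟩ | ⟨a, k, hat, hRa, haj, rfl, hb1, hb2⟩) | ⟨⟨htj, -⟩, hg, k', hk', hb⟩)
      · exact Or.inl ⟨rfl, rfl⟩
      · exact Or.inr ⟨a, k, by omega, hRa, haj, rfl, hb1, hb2⟩
      · exact Or.inr ⟨t, k', by omega, (hK k').mp hk', htj, hg, hb.1, hb.2⟩
    · rintro (⟨rfl, rfl⟩ | ⟨a, k, hat, hRa, haj, rfl, hb1, hb2⟩)
      · exact Or.inl (Or.inl ⟨rfl, rfl⟩)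
      · rcases Nat.lt_or_ge a t with h | h
        · exact Or.inl (Or.inr ⟨a, k, h, hRa, haj, rfl, hb1, hb2⟩)
        · have : a = t := by omega
          subst this
          exact Or.inr ⟨⟨haj, hj⟩, rfl, k, (hK k).mpr hRa, hb1, hb2⟩

theorem B_iff (stones : List Int) (hne : stones ≠ []) :
    (canCross1_alt stones = true ↔ ∃ g, Rch stones (stones.length - 1) g) := by
  have hn : 0 < stones.length := List.length_pos_iff.mpr hne
  obtain ⟨ilen, imem⟩ := inv stones hne stones.length le_rfl
  simp only [canCross1_alt]
  rw [if_neg (by omega)]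
  have hbody : (fun (reach : List (PySem.Set Int)) (i : Nat) =>
      (reach.getD i PySem.Set.empty).foldl (fun reach k =>
        (PySem.List.pyRange ((i : Int) + 1) (stones.length : Int) 1).foldl (fun reach j =>
          let gap := PySem.List.pyGetD stones j 0 - PySem.List.pyGetD stones (i : Int) 0
          if k - 1 ≤ gap ∧ gap ≤ k + 1 then
            PySem.List.pySetD reach j (PySem.Set.add (PySem.List.pyGetD reach j PySem.Set.empty) gap)
          else reach) reach) reach)
      = fun reach i => midN stones i reach := by
    funext reach i; exact body_eq stones reach i
  rw [hbody]
  have hinit : ((List.range stones.length).map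
        (fun _ => (PySem.Set.empty : PySem.Set Int))).set 0
      (PySem.Set.add (((List.range stones.length).map
        (fun _ => (PySem.Set.empty : PySem.Set Int))).getD 0 PySem.Set.empty) 0)
      = reachInit stones.length := rfl
  rw [hinit]
  have hemp : (PySem.Set.empty : PySem.Set Int) = [] := rfl
  rw [hemp]
  rw [decide_eq_true_iff]
  have hlenpos : (0 < PySem.Set.len (((List.range stones.length).foldl
      (fun r i => midN stones i r) (reachInit stones.length)).getD (stones.length - 1) [])) ↔
      ∃ g, g ∈ ((List.range stones.length).foldl (fun r i => midN stones i r)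
        (reachInit stones.length)).getD (stones.length - 1) [] := by
    rw [show ∀ s : PySem.Set Int, PySem.Set.len s = (s.length : Int) from fun _ => rfl]
    simp [List.length_pos_iff_exists_mem]
  rw [hlenpos]
  constructor
  · rintro ⟨g, hg⟩
    rw [imem _ g (by omega)] at hg
    exact ⟨g, (RL_iff_Rch stones stones.length (stones.length - 1) g (by omega) (by omega)).mp hg⟩
  · rintro ⟨g, hg⟩
    exact ⟨g, (imem _ g (by omega)).mpr
      ((RL_iff_Rch stones stones.length (stones.length - 1) g (by omega) (by omega)).mpr hg)⟩

theorem A_char (stones : List Int) : ∀ (fuel : Nat) (idx : Nat) (js : Int),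
    idx < stones.length → stones.length - idx ≤ fuel →
    (canCross1Aux stones fuel (idx : Int) js = true ↔ RF stones idx js) := by
  intro fuel
  induction fuel with
  | zero => intro idx js h1 h2; omega
  | succ fuel ih =>
    intro idx js hidx hfuel
    simp only [canCross1Aux, Bool.or_eq_true, List.any_eq_true, Bool.and_eq_true,
      decide_eq_true_eq, beq_iff_eq]
    constructor
    · rintro (⟨i, hmem, hcond, haux⟩ | hbase)
      · rw [PySem.List.mem_pyRange_one] at hmem
        obtain ⟨hlo, hhi⟩ := hmem
        have hi : ((i.toNat : Nat) : Int) = i := Int.toNat_of_nonneg (by omega)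
        rw [← hi, PySem.List.pyGetD_natCast, PySem.List.pyGetD_natCast] at hcond haux
        have hb : i.toNat < stones.length := by omega
        exact RF.step idx i.toNat js (by omega) hb hcond.1 hcond.2
          ((ih i.toNat _ hb (by omega)).mp haux)
      · exact RF.base idx js (by omega)
    · intro h
      cases h with
      | base _ _ hidx' => right; omega
      | step _ b _ hab hb h1 h2 hf =>
        left
        refine ⟨(b : Int), ?_, ?_, ?_⟩
        · rw [PySem.List.mem_pyRange_one]; omega
        · rw [PySem.List.pyGetD_natCast, PySem.List.pyGetD_natCast]; exact ⟨h1, h2⟩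
        · rw [PySem.List.pyGetD_natCast, PySem.List.pyGetD_natCast]
          exact (ih b _ hb (by omega)).mpr hf

theorem A_iff (stones : List Int) (hne : stones ≠ []) :
    (canCross1 stones = true ↔ ∃ g, Rch stones (stones.length - 1) g) := by
  have hlen : 0 < stones.length := List.length_pos_iff.mpr hne
  have hc := A_char stones stones.length 0 0 hlen (by omega)
  norm_num at hc
  unfold canCross1
  rw [hc]
  constructor
  · intro h; exact Rch_end_of_RF stones h Rch.refl
  · rintro ⟨g, hg⟩
    exact RF_of_Rch stones hg (RF.base _ g rfl)

-- ===== VERDICT (by name: the statement is the Claim_ definition above) =====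
theorem canCross1_spec : Claim_equal_canCross1 := by
  intro stones _
  unfold Spec_canCross1
  by_cases hne : stones = []
  · subst hne; decide
  · rw [Bool.eq_iff_iff, A_iff stones hne, B_iff stones hne]
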